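-- pv_equiv track=rewrite | github.com/ynxu15/leetcodePractice | zuo_book/section1/a_3_reverse_stack_with_recursion.py | get_last_element
-- ===== SOURCE A (Python) =====
-- def get_last_element(stack):
--     item = stack.pop()
--     if not stack:
--         return item
--     else:
--         last_element = get_last_element(stack)
--         stack.append(item)
--         return last_element
-- ===== SOURCE B (Python) =====
-- def get_last_element(stack):
--     item = stack.pop()
--     temp = []
--     while stack:
--         temp.append(item)
--         item = stack.pop()
--     while temp:
--         stack.append(temp.pop())
--     return item
-- ===== Notes on version B (the rewrite author's own statement) =====
-- stated objective: alternative
-- what changed: Replaces A's recursion (pop top, recurse to the bottom, re-push on unwind) with an explicit iterative loop that pops elements into a temp list until the bottom is reached, then pushes them back; same return value, no recursion.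
import Mathlib
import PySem

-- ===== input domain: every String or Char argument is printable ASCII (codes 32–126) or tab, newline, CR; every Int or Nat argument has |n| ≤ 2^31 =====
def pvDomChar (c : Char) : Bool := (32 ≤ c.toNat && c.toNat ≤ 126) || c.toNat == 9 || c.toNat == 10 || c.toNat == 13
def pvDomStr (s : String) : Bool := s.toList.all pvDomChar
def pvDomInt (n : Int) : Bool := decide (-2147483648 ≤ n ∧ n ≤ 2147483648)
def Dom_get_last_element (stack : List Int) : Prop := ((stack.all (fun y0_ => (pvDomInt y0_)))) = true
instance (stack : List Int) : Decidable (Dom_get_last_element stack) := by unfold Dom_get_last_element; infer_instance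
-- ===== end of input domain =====

-- B re-implements A's recursive bottom-pop iteratively (pop into a temp list, then restore);
-- equivalence is about the RETURN value only — both Pythons also mutate `stack` identically
-- (the bottom element is removed, the rest keeps its order).

-- ===== PORT A =====
-- A: item = stack.pop() (pop from the top = list end); if the rest is empty return item,
-- else recurse on the rest (the append on unwind only mutates, it does not affect the result).
def get_last_element : List Int → Int
  | [] => 0          -- unreachable: Pre_ excludes the empty stack (Python raises IndexError)
  | x :: xs =>
    let item := (x :: xs).getLastD 0   -- stack.pop(): the top (list end; stack is nonempty here)
    let rest := (x :: xs).dropLast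
    if rest = [] then item else get_last_element rest
termination_by s => s.length
decreasing_by simp [List.length_dropLast]

-- ===== PORT B =====
-- B's while loop: repeatedly stash `item` in temp and pop the next into `item` until the
-- stack is empty; popping from the end step by step = structural recursion over the reverse.
def bLoop (item : Int) (stack : List Int) (temp : List Int) : Int :=
  match stack with
  | [] => item
  | x :: rest => bLoop x rest (item :: temp)   -- temp.append(item); item = stack.pop()
                                               -- (temp is only pushed back onto the stack, it
                                               --  never affects the returned value)

def get_last_element_alt (stack : List Int) : Int :=
  match stack.reverse with                     -- pops come from the list end
  | [] => 0          -- unreachable: Pre_ excludes the empty stack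
  | item :: rest => bLoop item rest []

-- ===== PRECONDITION & SPEC =====
-- Pre_ excludes exactly the empty stack, on which Python A raises IndexError.
def Pre_get_last_element (stack : List Int) : Prop := stack ≠ []
instance (stack : List Int) : Decidable (Pre_get_last_element stack) := by
  unfold Pre_get_last_element; infer_instance

def pvWitness_get_last_element : List Int := [1, 2, 3]

def Spec_get_last_element (stack : List Int) (out : Int) : Prop := out = get_last_element_alt stack
instance (stack : List Int) (out : Int) : Decidable (Spec_get_last_element stack out) := by
  unfold Spec_get_last_element; infer_instance

-- ===== CLAIM (what is proved, stated in full; the proofs are below) =====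
def Claim_equal_get_last_element : Prop := ∀ (stack : List Int), Dom_get_last_element stack → Pre_get_last_element stack → Spec_get_last_element stack (get_last_element stack)

-- ===== LEMMAS AND PROOFS =====

-- A returns the head (bottom) of the stack.
theorem a_eq_head : ∀ (n : Nat) (x : Int) (xs : List Int), xs.length ≤ n →
    get_last_element (x :: xs) = x := by
  intro n
  induction n with
  | zero =>
    intro x xs h
    have hx : xs = [] := List.eq_nil_of_length_eq_zero (Nat.le_zero.mp h)
    subst hx
    rw [get_last_element]; rfl
  | succ n ih =>
    intro x xs h
    cases xs with
    | nil => rw [get_last_element]; rfl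
    | cons y ys =>
      rw [get_last_element]
      have hd : (x :: y :: ys).dropLast = x :: (y :: ys).dropLast := rfl
      have hne : (x :: y :: ys).dropLast ≠ [] := by rw [hd]; simp
      rw [if_neg hne, hd]
      exact ih x _ (by
        have h1 : ((y :: ys).dropLast).length = ys.length := by simp
        have h2 : (y :: ys).length = ys.length + 1 := rfl
        rw [h1]
        rw [h2] at h
        omega)

theorem get_last_element_eq_headD (stack : List Int) (h : stack ≠ []) :
    get_last_element stack = stack.headD 0 := by
  cases stack with
  | nil => simp at h
  | cons x xs => simpa using a_eq_head xs.length x xs le_rfl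

-- bLoop returns the last element of its stack argument (or item if it is empty).
theorem bLoop_eq_getLastD (item : Int) (stack temp : List Int) :
    bLoop item stack temp = stack.getLastD item := by
  induction stack generalizing item temp with
  | nil => rfl
  | cons x rest ih => rw [bLoop, ih, List.getLastD_cons]

-- B returns the head (bottom) of the stack too.
theorem get_last_element_alt_eq_headD (stack : List Int) (h : stack ≠ []) :
    get_last_element_alt stack = stack.headD 0 := by
  cases stack with
  | nil => simp at h
  | cons x xs =>
    unfold get_last_element_alt
    cases hx : (x :: xs).reverse with
    | nil => simp at hx
    | cons a t =>
      show bLoop a t [] = (x :: xs).headD 0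
      rw [bLoop_eq_getLastD]
      have h1 : t.getLastD a = (a :: t).getLastD 0 := (List.getLastD_cons).symm
      have h2 : (a :: t).getLast? = some x := by
        rw [← hx, List.getLast?_reverse]
        rfl
      rw [h1, List.getLastD_eq_getLast?, h2]
      rfl

-- ===== VERDICT (by name: the statement is the Claim_ definition above) =====
theorem get_last_element_spec : Claim_equal_get_last_element := by
  intro stack _ hpre
  unfold Spec_get_last_element
  rw [get_last_element_eq_headD stack hpre, get_last_element_alt_eq_headD stack hpre]
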